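-- pv_equiv track=rewrite | github.com/Somesh-J/Email-Automation | core/security.py | validate_email_content
-- ===== SOURCE A (Python) =====
-- def validate_email_content(content: str) -> bool:
--     """Validate email content for security"""
--     # Check for suspicious patterns
--     suspicious_patterns = [
--         "<script",
--         "javascript:",
--         "data:text/html",
--         "vbscript:",
--         "onload=",
--         "onerror=",
--         "onclick="
--     ]
--
--     content_lower = content.lower()
--     return not any(pattern in content_lower for pattern in suspicious_patterns)
-- ===== SOURCE B (Python) =====
-- def validate_email_content(content: str) -> bool:
--     """Validate email content for security: single left-to-right scan checking
--     each position for any suspicious pattern starting there."""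
--     suspicious_patterns = (
--         "<script",
--         "javascript:",
--         "data:text/html",
--         "vbscript:",
--         "onload=",
--         "onerror=",
--         "onclick=",
--     )
--     content_lower = content.lower()
--     for i in range(len(content_lower)):
--         if any(content_lower.startswith(p, i) for p in suspicious_patterns):
--             return False
--     return True
-- ===== Notes on version B (the rewrite author's own statement) =====
-- stated objective: alternative
-- what changed: A runs seven independent in-operator substring scans over the lowercased content; B makes a single left-to-right pass over the lowercased content, testing at each position whether any of the seven patterns starts there (startswith per position).
import Mathlib
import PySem

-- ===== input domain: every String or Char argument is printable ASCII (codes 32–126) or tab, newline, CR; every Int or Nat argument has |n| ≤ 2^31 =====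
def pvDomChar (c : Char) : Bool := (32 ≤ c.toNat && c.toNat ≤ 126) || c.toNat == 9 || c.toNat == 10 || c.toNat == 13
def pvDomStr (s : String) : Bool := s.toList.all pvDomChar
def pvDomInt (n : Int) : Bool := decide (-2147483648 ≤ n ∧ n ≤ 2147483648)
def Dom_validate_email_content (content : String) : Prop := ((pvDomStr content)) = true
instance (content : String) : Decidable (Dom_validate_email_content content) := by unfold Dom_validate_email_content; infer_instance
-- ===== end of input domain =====

-- B replaces A's seven independent substring scans with one left-to-right scan
-- checking each position for any pattern prefix (objective: alternative single-pass structure).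

-- ===== PORT A =====
def pvSuspiciousPatterns : List String :=
  ["<script", "javascript:", "data:text/html", "vbscript:", "onload=", "onerror=", "onclick="]

def validate_email_content (content : String) : Bool :=
  let content_lower := PySem.Str.lower content
  !(pvSuspiciousPatterns.any (fun pattern => PySem.Str.isIn pattern content_lower))

-- ===== PORT B =====
-- single scan: at each position (suffix) test whether any pattern starts there
def pvScan (cs : List Char) : Bool :=
  match cs with
  | [] => true
  | c :: rest =>
      if pvSuspiciousPatterns.any (fun p => PySem.Chars.startswith (c :: rest) p.toList)
      then false
      else pvScan rest

def validate_email_content_alt (content : String) : Bool :=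
  pvScan (PySem.Chars.lower content.toList)

-- ===== PRECONDITION & SPEC =====
def Spec_validate_email_content (content : String) (out : Bool) : Prop := out = validate_email_content_alt content
instance (content : String) (out : Bool) : Decidable (Spec_validate_email_content content out) := by unfold Spec_validate_email_content; infer_instance

-- ===== CLAIM (what is proved, stated in full; the proofs are below) =====
def Claim_equal_validate_email_content : Prop := ∀ (content : String), Dom_validate_email_content content → Spec_validate_email_content content (validate_email_content content)

-- ===== LEMMAS AND PROOFS =====

-- substring containment on a cons splits into "matches here" or "matches later"
lemma pvIsIn_cons (p : List Char) (c : Char) (rest : List Char) :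
    PySem.Chars.isIn p (c :: rest)
      = (PySem.Chars.startswith (c :: rest) p || PySem.Chars.isIn p rest) := by
  rw [Bool.eq_iff_iff, Bool.or_eq_true, PySem.Chars.isIn_iff_infix,
    PySem.Chars.isIn_iff_infix, PySem.Chars.startswith_iff]
  exact List.infix_cons_iff

lemma pvScan_eq (cs : List Char) :
    pvScan cs = !(pvSuspiciousPatterns.any (fun p => PySem.Chars.isIn p.toList cs)) := by
  induction cs with
  | nil => decide
  | cons c rest ih =>
      by_cases hs : pvSuspiciousPatterns.any
          (fun p => PySem.Chars.startswith (c :: rest) p.toList) = true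
      · obtain ⟨p, hp, hsw⟩ := List.any_eq_true.mp hs
        have : pvSuspiciousPatterns.any (fun p => PySem.Chars.isIn p.toList (c :: rest)) = true :=
          List.any_eq_true.mpr ⟨p, hp, by simp [pvIsIn_cons, hsw]⟩
        simp [pvScan, hs, this]
      · have hcong : pvSuspiciousPatterns.any (fun p => PySem.Chars.isIn p.toList (c :: rest))
            = pvSuspiciousPatterns.any (fun p => PySem.Chars.isIn p.toList rest) := by
          rw [Bool.eq_iff_iff]
          simp only [List.any_eq_true]
          constructor
          · rintro ⟨p, hp, h⟩
            have hsw : PySem.Chars.startswith (c :: rest) p.toList = false := by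
              have := List.any_eq_false.mp (Bool.eq_false_iff.mpr hs) p hp
              simpa using this
            exact ⟨p, hp, by rw [pvIsIn_cons, hsw] at h; simpa using h⟩
          · rintro ⟨p, hp, h⟩
            exact ⟨p, hp, by rw [pvIsIn_cons]; simp [h]⟩
        simp [pvScan, hs, hcong, ih]

-- ===== VERDICT (by name: the statement is the Claim_ definition above) =====
theorem validate_email_content_spec : Claim_equal_validate_email_content := by
  intro content _
  unfold Spec_validate_email_content validate_email_content validate_email_content_alt
  rw [pvScan_eq]
  simp [PySem.Str.isIn_eq]
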